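-- pv_equiv track=rewrite | github.com/win10ogod/skillflow-mcp | src/skillflow/config_converter.py | _detect_transport_type
-- ===== SOURCE A (Python) =====
-- from typing import Any, Optional
--
-- def _detect_transport_type(
--     command: str,
--     args: list[str],
--     config: dict[str, Any]
-- ) -> Optional[str]:
--     """Detect transport type from command/args/config.
--
--     Args:
--         command: Command to run
--         args: Command arguments
--         config: Full configuration
--
--     Returns:
--         Transport type or None if cannot detect
--     """
--     # Check if explicitly specified
--     if "transport" in config:
--         return config["transport"]
--
--     # Detect from command/args
--     # Only check command and module names, not file paths to avoid false positives
--     all_parts = [command] + args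
--
--     # Check for HTTP/SSE indicators
--     # Look for http in command or module names (e.g., "http-server", "mcp-http")
--     for part in all_parts:
--         part_lower = part.lower()
--         # Skip file paths (contain \ or / or :)
--         if '\\' in part or '/' in part or ':' in part:
--             continue
--
--         if "http" in part_lower:
--             if "sse" in part_lower:
--                 return "http_sse"
--             return "streamable_http"
--
--     # Check for WebSocket indicators
--     # Only match explicit websocket keywords, not substrings in paths
--     for part in all_parts:
--         part_lower = part.lower()
--         # Skip file paths
--         if '\\' in part or '/' in part or ':' in part:
--             continue
--
--         # Only match if "websocket" or "ws" as a whole word/module name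
--         if part_lower == "websocket" or part_lower == "ws" or \
--            part_lower.startswith("websocket-") or part_lower.startswith("ws-") or \
--            "-websocket" in part_lower or "-ws-" in part_lower or \
--            "websocket_" in part_lower or "ws_" in part_lower:
--             return "websocket"
--
--     # Default to stdio
--     return "stdio"
-- ===== SOURCE B (Python) =====
-- from typing import Any, Optional
--
-- def _detect_transport_type(
--     command: str,
--     args: list[str],
--     config: dict[str, Any]
-- ) -> Optional[str]:
--     if "transport" in config:
--         return config["transport"]
--
--     ws_result = None
--     for part in [command] + args:
--         # Skip file paths (contain \ or / or :)
--         if '\\' in part or '/' in part or ':' in part: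
--             continue
--
--         part_lower = part.lower()
--         if "http" in part_lower:
--             return "http_sse" if "sse" in part_lower else "streamable_http"
--
--         if ws_result is None and (
--             part_lower == "websocket" or part_lower == "ws" or
--             part_lower.startswith("websocket-") or part_lower.startswith("ws-") or
--             "-websocket" in part_lower or "-ws-" in part_lower or
--             "websocket_" in part_lower or "ws_" in part_lower
--         ):
--             ws_result = "websocket"
--
--     return ws_result if ws_result is not None else "stdio"
-- ===== Notes on version B (the rewrite author's own statement) =====
-- stated objective: alternative
-- what changed: Replaces A's two sequential scans over [command]+args (first for http, then for websocket) with a single fused pass that returns http matches immediately and defers a first websocket match in a local variable until the loop ends, preserving http's cross-part priority.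
import Mathlib
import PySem

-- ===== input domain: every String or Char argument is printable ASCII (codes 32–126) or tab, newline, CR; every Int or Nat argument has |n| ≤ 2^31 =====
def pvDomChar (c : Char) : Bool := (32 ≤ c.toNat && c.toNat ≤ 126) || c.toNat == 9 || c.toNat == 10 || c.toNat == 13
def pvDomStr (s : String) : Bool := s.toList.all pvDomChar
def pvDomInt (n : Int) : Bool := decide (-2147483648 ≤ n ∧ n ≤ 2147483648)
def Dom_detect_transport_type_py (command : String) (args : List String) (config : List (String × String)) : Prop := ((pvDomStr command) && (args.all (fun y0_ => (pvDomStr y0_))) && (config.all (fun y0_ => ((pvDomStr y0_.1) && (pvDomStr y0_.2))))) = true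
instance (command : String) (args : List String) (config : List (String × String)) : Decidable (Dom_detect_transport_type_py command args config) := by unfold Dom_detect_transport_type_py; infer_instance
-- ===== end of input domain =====

-- B merges A's two sequential scans into one pass that returns http hits immediately and
-- remembers a pending websocket hit; same results, one traversal instead of two (objective: alternative).

-- shared literal predicates (the identical expressions both Pythons write)
-- "'\\' in part or '/' in part or ':' in part"
def pvIsPath (p : String) : Bool :=
  PySem.Str.isIn "\\" p || PySem.Str.isIn "/" p || PySem.Str.isIn ":" p

-- the websocket whole-word test, on the lowered part
def pvWsPred (pl : String) : Bool :=
  pl == "websocket" || pl == "ws" ||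
  PySem.Str.startswith pl "websocket-" || PySem.Str.startswith pl "ws-" ||
  PySem.Str.isIn "-websocket" pl || PySem.Str.isIn "-ws-" pl ||
  PySem.Str.isIn "websocket_" pl || PySem.Str.isIn "ws_" pl

-- ===== PORT A =====
-- A's first loop: first non-path part containing "http"
def pvHttpScan : List String → Option String
  | [] => none
  | p :: rest =>
    let pl := PySem.Str.lower p
    if pvIsPath p then pvHttpScan rest
    else if PySem.Str.isIn "http" pl then
      if PySem.Str.isIn "sse" pl then some "http_sse" else some "streamable_http"
    else pvHttpScan rest

-- A's second loop: first non-path part matching the websocket test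
def pvWsScan : List String → Option String
  | [] => none
  | p :: rest =>
    let pl := PySem.Str.lower p
    if pvIsPath p then pvWsScan rest
    else if pvWsPred pl then some "websocket"
    else pvWsScan rest

def detect_transport_type_py (command : String) (args : List String) (config : List (String × String)) : Option String :=
  let d : PySem.Dict String String := PySem.Dict.mk config
  if d.contains "transport" then d.get? "transport"
  else
    let all_parts := command :: args
    match pvHttpScan all_parts with
    | some r => some r
    | none =>
      match pvWsScan all_parts with
      | some r => some r
      | none => some "stdio"

-- ===== PORT B =====
-- B's single loop, carrying the pending websocket result (None until first ws hit)
def pvAltLoop : List String → Option String → Option String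
  | [], ws => some (ws.getD "stdio")
  | p :: rest, ws =>
    if pvIsPath p then pvAltLoop rest ws
    else
      let pl := PySem.Str.lower p
      if PySem.Str.isIn "http" pl then
        some (if PySem.Str.isIn "sse" pl then "http_sse" else "streamable_http")
      else if ws.isNone && pvWsPred pl then pvAltLoop rest (some "websocket")
      else pvAltLoop rest ws

def detect_transport_type_py_alt (command : String) (args : List String) (config : List (String × String)) : Option String :=
  let d : PySem.Dict String String := PySem.Dict.mk config
  if d.contains "transport" then d.get? "transport"
  else pvAltLoop (command :: args) none

-- ===== PRECONDITION & SPEC =====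
def Spec_detect_transport_type_py (command : String) (args : List String) (config : List (String × String)) (out : Option String) : Prop := out = detect_transport_type_py_alt command args config
instance (command : String) (args : List String) (config : List (String × String)) (out : Option String) : Decidable (Spec_detect_transport_type_py command args config out) := by unfold Spec_detect_transport_type_py; infer_instance

-- ===== CLAIM (what is proved, stated in full; the proofs are below) =====
def Claim_equal_detect_transport_type_py : Prop := ∀ (command : String) (args : List String) (config : List (String × String)), Dom_detect_transport_type_py command args config → Spec_detect_transport_type_py command args config (detect_transport_type_py command args config)

-- ===== LEMMAS AND PROOFS =====

-- B's fused loop computes exactly A's two-scan cascade, for any pending websocket state.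
theorem pvAltLoop_eq (parts : List String) : ∀ ws : Option String,
    pvAltLoop parts ws =
      match pvHttpScan parts with
      | some r => some r
      | none =>
        match ws with
        | some w => some w
        | none =>
          match pvWsScan parts with
          | some r => some r
          | none => some "stdio" := by
  induction parts with
  | nil => intro ws; cases ws <;> simp [pvAltLoop, pvHttpScan, pvWsScan]
  | cons p rest ih =>
    intro ws
    by_cases hp : pvIsPath p = true
    · simp [pvAltLoop, pvHttpScan, pvWsScan, hp, ih]
    · by_cases hh : PySem.Chars.isIn ['h', 't', 't', 'p'] (PySem.Chars.lower p.toList) = true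
      · simp [pvAltLoop, pvHttpScan, hp, hh]
        split <;> rfl
      · by_cases hw : pvWsPred (PySem.Str.lower p) = true
        · cases ws <;>
            simp [pvAltLoop, pvHttpScan, pvWsScan, hp, hh, hw, ih]
        · cases ws <;>
            simp [pvAltLoop, pvHttpScan, pvWsScan, hp, hh, hw, ih]

-- ===== VERDICT (by name: the statement is the Claim_ definition above) =====
theorem detect_transport_type_py_spec : Claim_equal_detect_transport_type_py := by
  intro command args config _
  unfold Spec_detect_transport_type_py detect_transport_type_py detect_transport_type_py_alt
  by_cases hc : (PySem.Dict.mk config : PySem.Dict String String).contains "transport" = true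
  · simp [hc]
  · simp [hc, pvAltLoop_eq]
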